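-- pv_equiv track=rewrite | github.com/daoolet/Codewars-Solutions | 6 kyu/Row of the odd triangle.py | odd_row
-- ===== SOURCE A (Python) =====
-- def odd_row(x: int) -> list:
--     first = 1
--     for i in range(x):
--         first += i * 2
--
--     answer = [first]
--
--     for i in range(x):
--         first += 2
--         answer.append(first)
--
--     return answer[:-1]
-- ===== SOURCE B (Python) =====
-- def odd_row(x: int) -> list:
--     start = x * x - x + 1
--     return [start + 2 * i for i in range(x)]
-- ===== Notes on version B (the rewrite author's own statement) =====
-- stated objective: simpler
-- what changed: Both of A's loops (the summation computing the starting value and the append loop with trailing-element trimming) are replaced by a closed-form start plus a single comprehension over range(x).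
import Mathlib
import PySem

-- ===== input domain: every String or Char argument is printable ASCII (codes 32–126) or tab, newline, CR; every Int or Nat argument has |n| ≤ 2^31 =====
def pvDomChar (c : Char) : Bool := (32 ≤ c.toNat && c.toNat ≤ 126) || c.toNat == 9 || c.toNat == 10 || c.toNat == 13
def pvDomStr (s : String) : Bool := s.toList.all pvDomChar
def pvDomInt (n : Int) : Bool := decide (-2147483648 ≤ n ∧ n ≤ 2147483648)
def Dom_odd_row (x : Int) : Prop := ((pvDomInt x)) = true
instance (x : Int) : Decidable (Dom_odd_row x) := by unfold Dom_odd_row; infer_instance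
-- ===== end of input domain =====

-- B replaces A's two loops by the closed form x*x-x+1 and a single comprehension (simpler; same O(x) cost).

-- ===== PORT A =====
def odd_row (x : Int) : List Int :=
  let first := (PySem.List.pyRange 0 x 1).foldl (fun f i => f + i * 2) 1
  let answer := [first]
  let st := (PySem.List.pyRange 0 x 1).foldl
    (fun (p : Int × List Int) _ => (p.1 + 2, p.2 ++ [p.1 + 2])) (first, answer)
  PySem.List.slice st.2 none (some (-1))

-- ===== PORT B =====
def odd_row_alt (x : Int) : List Int :=
  let start := x * x - x + 1
  (PySem.List.pyRange 0 x 1).map (fun i => start + 2 * i)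

-- ===== PRECONDITION & SPEC =====
def Spec_odd_row (x : Int) (out : List Int) : Prop := out = odd_row_alt x
instance (x : Int) (out : List Int) : Decidable (Spec_odd_row x out) := by unfold Spec_odd_row; infer_instance

-- ===== CLAIM (what is proved, stated in full; the proofs are below) =====
def Claim_equal_odd_row : Prop := ∀ (x : Int), Dom_odd_row x → Spec_odd_row x (odd_row x)

-- ===== LEMMAS AND PROOFS =====

lemma pv_fold_first (n : Nat) :
    (List.range n).foldl (fun (f : Int) (i : Nat) => f + (i : Int) * 2) 1
      = (n : Int) * n - n + 1 := by
  induction n with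
  | zero => simp
  | succ m ih => rw [List.range_succ, List.foldl_append, ih]; simp; ring

lemma pv_fold_loop {A : Type} (l : List A) (s : Int) (acc : List Int) :
    (l.foldl (fun (p : Int × List Int) _ => (p.1 + 2, p.2 ++ [p.1 + 2])) (s, acc)).2
      = acc ++ (List.range l.length).map (fun (k : Nat) => s + 2 * ((k : Int) + 1)) := by
  induction l generalizing s acc with
  | nil => simp
  | cons a t ih =>
      simp only [List.foldl_cons, ih, List.length_cons]
      rw [List.range_succ_eq_map]
      simp only [List.map_cons, List.map_map, List.append_assoc, List.singleton_append]
      congr 1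
      rw [List.cons_eq_cons]
      refine ⟨by norm_num, ?_⟩
      apply List.map_congr_left
      intro k _
      simp only [Function.comp_apply]
      push_cast
      ring

lemma pv_trim (c : Int) (n : Nat) :
    ([c] ++ (List.range (n + 1)).map (fun (k : Nat) => c + 2 * ((k : Int) + 1))).dropLast
      = (List.range (n + 1)).map (fun (k : Nat) => c + 2 * (k : Int)) := by
  conv_lhs => rw [List.range_succ]
  rw [List.map_append, List.map_singleton, List.singleton_append, ← List.cons_append,
    List.dropLast_concat, List.range_succ_eq_map]
  simp only [List.map_cons, List.map_map, Nat.cast_zero]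
  congr 1
  ring

-- ===== VERDICT (by name: the statement is the Claim_ definition above) =====
theorem odd_row_spec : Claim_equal_odd_row := by
  intro x _
  show odd_row x = odd_row_alt x
  unfold odd_row odd_row_alt
  rw [PySem.List.pyRange_one]
  simp only [Int.sub_zero, List.foldl_map, zero_add, List.map_map]
  rw [pv_fold_first, pv_fold_loop]
  simp only [List.length_range]
  rw [PySem.List.slice_to_neg_one]
  rcases le_or_gt x 0 with hx | hx
  · have h0 : x.toNat = 0 := Int.toNat_of_nonpos hx
    simp [h0]
  · have hxt : (x.toNat : Int) = x := Int.toNat_of_nonneg (le_of_lt hx)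
    obtain ⟨m, hm⟩ : ∃ m, x.toNat = m + 1 := ⟨x.toNat - 1, by omega⟩
    rw [hm] at hxt ⊢
    rw [pv_trim]
    apply List.map_congr_left
    intro k _
    simp only [Function.comp_apply]
    rw [← hxt]
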